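-- pv_equiv track=rewrite | github.com/soulwax/pyannotate | src/pyannotate/annotate_headers.py | _collect_metadata_lines
-- ===== SOURCE A (Python) =====
-- from typing import Dict, List, Optional, Set, Tuple
--
-- def _collect_metadata_lines(lines: List[str], comment_start: str) -> List[str]:
--     """Collect metadata lines from the beginning of a file."""
--     metadata_lines: List[str] = []
--     in_metadata_block = False
--
--     # Look at up to the first 10 lines for metadata
--     for i in range(min(10, len(lines))):
--         line = lines[i].strip()
--         # Skip empty lines
--         if not line:
--             continue
--
--         # If line starts with a comment and contains metadata
--         if line.startswith(comment_start) and any(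
--             keyword in line.lower()
--             for keyword in ["author:", "version:", "copyright:", "created:", "description:"]
--         ):
--             metadata_lines.append(line)
--             in_metadata_block = True
--         elif in_metadata_block and line.startswith(comment_start):
--             # Continue collecting metadata if we're in a block of commented lines
--             metadata_lines.append(line)
--         else:
--             # Stop once we hit non-comment or non-metadata content
--             if in_metadata_block:
--                 break
--
--     return metadata_lines
-- ===== SOURCE B (Python) =====
-- from typing import List
--
-- _KEYWORDS = ["author:", "version:", "copyright:", "created:", "description:"]
--
--
-- def _collect_metadata_lines(lines: List[str], comment_start: str) -> List[str]:
--     """Collect metadata lines from the beginning of a file."""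
--     # Index-based decomposition: compute the start index of the block, then its
--     # end index, then produce the answer as one filtered slice.
--     head = [ln.strip() for ln in lines[:10]]
--     start = next(
--         (i for i, ln in enumerate(head)
--          if ln.startswith(comment_start)
--          and any(k in ln.lower() for k in _KEYWORDS)),
--         None,
--     )
--     if start is None:
--         return []
--     end = next(
--         (j for j in range(start + 1, len(head))
--          if head[j] and not head[j].startswith(comment_start)),
--         len(head),
--     )
--     return [ln for ln in head[start:end] if ln]
-- ===== Notes on version B (the rewrite author's own statement) =====
-- stated objective: simpler
-- what changed: Replaces A's flag-driven state machine with index arithmetic: find the start index of the first keyword comment line, find the end index of the block, and return one filtered slice head[start:end].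
import Mathlib
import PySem

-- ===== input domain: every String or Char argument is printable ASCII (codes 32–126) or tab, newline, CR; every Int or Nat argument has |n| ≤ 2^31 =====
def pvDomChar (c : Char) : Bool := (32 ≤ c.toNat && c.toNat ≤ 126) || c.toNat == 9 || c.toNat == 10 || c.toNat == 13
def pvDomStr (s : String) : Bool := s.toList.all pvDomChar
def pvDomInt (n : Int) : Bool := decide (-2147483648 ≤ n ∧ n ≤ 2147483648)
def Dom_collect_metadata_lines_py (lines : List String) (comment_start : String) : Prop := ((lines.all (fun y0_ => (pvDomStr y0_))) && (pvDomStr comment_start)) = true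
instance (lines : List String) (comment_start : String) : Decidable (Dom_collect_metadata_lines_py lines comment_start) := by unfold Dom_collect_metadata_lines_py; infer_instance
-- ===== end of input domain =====

-- B replaces A's flag-driven state machine with index arithmetic: find the start index,
-- find the end index, return one filtered slice (objective: simpler decomposition).
-- ===== PORT A =====
-- the metadata test: line.startswith(comment_start) and any(keyword in line.lower() for keyword in [...])
def pvIsMeta (comment_start line : String) : Bool :=
  PySem.Str.startswith line comment_start &&
    (["author:", "version:", "copyright:", "created:", "description:"].any
      (fun k => PySem.Str.isIn k (PySem.Str.lower line)))

-- A's loop over the first min(10, len) lines, carrying (metadata_lines, in_metadata_block); returning acc = break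
def pvLoopA (comment_start : String) : List String → List String → Bool → List String
  | [], acc, _ => acc
  | l :: rest, acc, flag =>
    let line := PySem.Str.strip l
    if line = "" then pvLoopA comment_start rest acc flag
    else if pvIsMeta comment_start line then pvLoopA comment_start rest (acc ++ [line]) true
    else if flag && PySem.Str.startswith line comment_start then
      pvLoopA comment_start rest (acc ++ [line]) flag
    else if flag then acc
    else pvLoopA comment_start rest acc flag

-- for i in range(min(10, len(lines))): lines[i]  — exactly the first min(10, len) lines, i.e. lines[:10]
def collect_metadata_lines_py (lines : List String) (comment_start : String) : List String :=
  pvLoopA comment_start (PySem.List.slice lines none (some 10)) [] false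

-- ===== PORT B =====
-- head[j] and not head[j].startswith(comment_start)  — the end-of-block test
def pvIsBad (comment_start line : String) : Bool :=
  decide (line ≠ "") && !PySem.Str.startswith line comment_start

-- Source B on the stripped head: start := next((i for i,ln in enumerate(head) if is_meta), None);
-- end := next((j for j in range(start+1, len(head)) if bad head[j]), len(head)); [ln for ln in head[start:end] if ln]
def pvAltCore (comment_start : String) (head : List String) : List String :=
  match head.findIdx? (pvIsMeta comment_start) with
  | none => []
  | some start =>
    let tail := head.drop (start + 1)
    let stop := (tail.findIdx? (pvIsBad comment_start)).getD tail.length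
    ((head.drop start).take (stop + 1)).filter (fun ln => ln ≠ "")

def collect_metadata_lines_py_alt (lines : List String) (comment_start : String) : List String :=
  pvAltCore comment_start ((PySem.List.slice lines none (some 10)).map PySem.Str.strip)

-- ===== PRECONDITION & SPEC =====
def Spec_collect_metadata_lines_py (lines : List String) (comment_start : String) (out : List String) : Prop := out = collect_metadata_lines_py_alt lines comment_start
instance (lines : List String) (comment_start : String) (out : List String) : Decidable (Spec_collect_metadata_lines_py lines comment_start out) := by unfold Spec_collect_metadata_lines_py; infer_instance

-- ===== CLAIM (what is proved, stated in full; the proofs are below) =====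
def Claim_equal_collect_metadata_lines_py : Prop := ∀ (lines : List String) (comment_start : String), Dom_collect_metadata_lines_py lines comment_start → Spec_collect_metadata_lines_py lines comment_start (collect_metadata_lines_py lines comment_start)

-- ===== LEMMAS AND PROOFS =====

-- a blank line never passes the metadata test (no keyword occurs in "")
theorem pvIsMeta_empty (cs : String) : pvIsMeta cs "" = false := by
  simp [pvIsMeta]
  exact fun _ => by decide

-- the empty line is never an end-of-block line
theorem pvIsBad_empty (cs : String) : pvIsBad cs "" = false := by
  simp [pvIsBad]

-- take-to-first-bad equals takeWhile-not-bad
theorem take_findIdx_bad (cs : String) (t : List String) :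
    t.take ((t.findIdx? (pvIsBad cs)).getD t.length) = t.takeWhile (fun l => !pvIsBad cs l) := by
  induction t with
  | nil => simp
  | cons a t ih =>
    by_cases hb : pvIsBad cs a = true
    · simp [List.findIdx?_cons, hb]
    · simp only [List.findIdx?_cons, hb, List.takeWhile_cons, if_false, Bool.false_eq_true, Bool.not_false, if_true]
      cases h : t.findIdx? (pvIsBad cs) with
      | none => simp [h] at ih ⊢; simpa using ih
      | some k => simp [h] at ih ⊢; simpa using ih

-- true-phase: once the flag is set, A's loop appends exactly the filtered takeWhile block
theorem pvLoopA_true (cs : String) (ls acc : List String) :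
    pvLoopA cs ls acc true =
      acc ++ ((ls.map PySem.Str.strip).takeWhile (fun l => !pvIsBad cs l)).filter (fun l => l ≠ "") := by
  induction ls generalizing acc with
  | nil => simp [pvLoopA]
  | cons l rest ih =>
    by_cases h0 : PySem.Str.strip l = ""
    · simp [pvLoopA, h0, pvIsBad_empty, ih]
    · by_cases hm : pvIsMeta cs (PySem.Str.strip l) = true
      · have hsw : PySem.Chars.startswith (PySem.Chars.strip l.toList) cs.toList = true := by
          have h := hm; simp [pvIsMeta] at h; exact h.1
        have hb : pvIsBad cs (PySem.Str.strip l) = false := by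
          simp [pvIsBad, PySem.Str.startswith, PySem.Str.strip, hsw]
        simp [pvLoopA, h0, hm, hb, ih]
      · by_cases hsw : PySem.Chars.startswith (PySem.Chars.strip l.toList) cs.toList = true
        · have hb : pvIsBad cs (PySem.Str.strip l) = false := by
            simp [pvIsBad, PySem.Str.startswith, PySem.Str.strip, hsw]
          simp [pvLoopA, h0, hm, hsw, hb, ih]
        · have h0' : ¬ PySem.Chars.strip l.toList = [] := by
            simpa [PySem.Str.strip, String.ext_iff] using h0
          have hb : pvIsBad cs (PySem.Str.strip l) = true := by
            simp [pvIsBad, PySem.Str.startswith, PySem.Str.strip, h0', eq_false_of_ne_true hsw]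
          simp [pvLoopA, h0, hm, hsw, hb]

-- a non-metadata leading line is transparent to B's core
theorem pvAltCore_cons_not_meta (cs x : String) (t : List String)
    (hx : pvIsMeta cs x = false) : pvAltCore cs (x :: t) = pvAltCore cs t := by
  unfold pvAltCore
  simp only [List.findIdx?_cons, hx, if_neg Bool.false_ne_true]
  cases h : t.findIdx? (pvIsMeta cs) with
  | none => simp
  | some s => simp [List.drop_succ_cons]

-- a leading metadata line starts the block
theorem pvAltCore_cons_meta (cs x : String) (t : List String)
    (hx : pvIsMeta cs x = true) :
    pvAltCore cs (x :: t) =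
      (x :: t.take ((t.findIdx? (pvIsBad cs)).getD t.length)).filter (fun l => l ≠ "") := by
  unfold pvAltCore
  rw [List.findIdx?_cons, if_pos hx]
  simp

-- false-phase: A's loop from the initial state equals B's core on the stripped lines
theorem pvLoopA_false (cs : String) (ls : List String) :
    pvLoopA cs ls [] false = pvAltCore cs (ls.map PySem.Str.strip) := by
  induction ls with
  | nil => simp [pvLoopA, pvAltCore]
  | cons l rest ih =>
    by_cases h0 : PySem.Str.strip l = ""
    · rw [List.map_cons, h0, pvAltCore_cons_not_meta cs _ _ (pvIsMeta_empty cs)]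
      simpa [pvLoopA, h0] using ih
    · by_cases hm : pvIsMeta cs (PySem.Str.strip l) = true
      · have hA : pvLoopA cs (l :: rest) [] false =
            PySem.Str.strip l ::
              ((rest.map PySem.Str.strip).takeWhile (fun x => !pvIsBad cs x)).filter (fun x => x ≠ "") := by
          simp [pvLoopA, h0, hm, pvLoopA_true]
        rw [hA, List.map_cons, pvAltCore_cons_meta cs _ _ hm, take_findIdx_bad]
        simp [h0]
      · rw [List.map_cons, pvAltCore_cons_not_meta cs _ _ (eq_false_of_ne_true hm)]
        simpa [pvLoopA, h0, hm] using ih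

-- ===== VERDICT (by name: the statement is the Claim_ definition above) =====
theorem collect_metadata_lines_py_spec : Claim_equal_collect_metadata_lines_py := by
  intro lines cs _
  show _ = _
  simp only [collect_metadata_lines_py, collect_metadata_lines_py_alt, pvLoopA_false]
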